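-- pv_equiv track=rewrite | github.com/TUF-SCAR/Jarvis_Local | Actions/security.py | is_allowed_app
-- ===== SOURCE A (Python) =====
-- def is_allowed_app(target: str, allowed: set[str]) -> bool:
--     t = (target or "").lower()
--     if t in allowed:
--         return True
--     for a in allowed:
--         if a.endswith(".exe") and t.endswith(a):
--             return True
--     return False
-- ===== SOURCE B (Python) =====
-- def is_allowed_app(target: str, allowed: set[str]) -> bool:
--     t = (target or "").lower()
--     if t in allowed:
--         return True
--     return _suffix_scan(t, allowed)
--
--
-- def _suffix_scan(suf: str, allowed: set[str]) -> bool: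
--     # peel one leading character per step, testing each suffix by set membership
--     while suf:
--         if suf.endswith(".exe") and suf in allowed:
--             return True
--         suf = suf[1:]
--     return False
-- ===== Notes on version B (the rewrite author's own statement) =====
-- stated objective: alternative
-- what changed: Instead of scanning the allowed collection and testing t.endswith(a) for each entry, B recurses over the suffixes of the lowercased target (a helper peeling one leading character per step) and returns True when a suffix ends with '.exe' and is a member of allowed; the target drives the scan and set membership replaces endswith as the test.
import Mathlib
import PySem

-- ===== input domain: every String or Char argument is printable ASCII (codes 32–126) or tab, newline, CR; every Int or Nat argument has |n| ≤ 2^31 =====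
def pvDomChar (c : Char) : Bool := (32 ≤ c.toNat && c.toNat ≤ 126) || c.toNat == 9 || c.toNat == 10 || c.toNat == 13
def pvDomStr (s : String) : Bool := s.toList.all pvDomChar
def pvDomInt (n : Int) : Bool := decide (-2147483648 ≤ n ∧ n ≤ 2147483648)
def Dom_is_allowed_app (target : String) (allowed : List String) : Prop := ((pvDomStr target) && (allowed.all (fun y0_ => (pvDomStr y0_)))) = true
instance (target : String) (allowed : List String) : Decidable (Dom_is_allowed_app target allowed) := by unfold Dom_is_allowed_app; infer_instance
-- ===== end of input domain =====

-- B replaces A's loop over `allowed` by a recursion over the suffixes of the lowercased target,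
-- using set membership as the test instead of endswith (objective: alternative).


-- ===== PORT A =====
def is_allowed_app (target : String) (allowed : List String) : Bool :=
  let t := PySem.Str.lower (if target == "" then "" else target)  -- (target or "").lower()
  if allowed.contains t then true
  else
    -- for a in allowed: if a.endswith(".exe") and t.endswith(a): return True
    allowed.any (fun a => PySem.Str.endswith a ".exe" && PySem.Str.endswith t a)

-- ===== PORT B =====
-- _suffix_scan(suf, allowed): recursion peeling one leading character per step
def pvSuffixScan (suf : List Char) (allowed : List String) : Bool :=
  match suf with
  | [] => false
  | c :: rest =>
    if PySem.Chars.endswith (c :: rest) ".exe".toList && allowed.contains (String.ofList (c :: rest))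
    then true
    else pvSuffixScan rest allowed

def is_allowed_app_alt (target : String) (allowed : List String) : Bool :=
  let t := PySem.Str.lower (if target == "" then "" else target)  -- (target or "").lower()
  if allowed.contains t then true
  else pvSuffixScan t.toList allowed

-- ===== PRECONDITION & SPEC =====
def Spec_is_allowed_app (target : String) (allowed : List String) (out : Bool) : Prop := out = is_allowed_app_alt target allowed
instance (target : String) (allowed : List String) (out : Bool) : Decidable (Spec_is_allowed_app target allowed out) := by unfold Spec_is_allowed_app; infer_instance

-- ===== CLAIM =====
def Claim_equal_is_allowed_app : Prop := ∀ (target : String) (allowed : List String), Dom_is_allowed_app target allowed → Spec_is_allowed_app target allowed (is_allowed_app target allowed)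

-- ===== LEMMAS AND PROOFS =====

-- the suffix recursion finds exactly the allowed entries ending in ".exe" that are suffixes of `suf`
theorem pv_scan_eq (allowed : List String) (suf : List Char) :
    pvSuffixScan suf allowed
      = allowed.any (fun a => PySem.Chars.endswith a.toList ".exe".toList
          && PySem.Chars.endswith suf a.toList) := by
  induction suf with
  | nil =>
    rw [Bool.eq_iff_iff]
    simp only [pvSuffixScan, List.any_eq_true, Bool.and_eq_true, PySem.Chars.endswith_iff]
    constructor
    · intro h; exact absurd h (by simp)
    · rintro ⟨a, _, hexe, hsuf⟩
      have : a.toList = [] := List.suffix_nil.mp hsuf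
      rw [this] at hexe
      exact absurd hexe (by simp at hexe ⊢)
  | cons c rest ih =>
    rw [Bool.eq_iff_iff]
    simp only [pvSuffixScan, List.any_eq_true, Bool.and_eq_true, PySem.Chars.endswith_iff]
    have ihiff : pvSuffixScan rest allowed = true
        ↔ ∃ a ∈ allowed, ".exe".toList <:+ a.toList ∧ a.toList <:+ rest := by
      rw [ih]; simp only [List.any_eq_true, Bool.and_eq_true, PySem.Chars.endswith_iff]
    split_ifs with h
    · obtain ⟨hexe, hmem⟩ := h
      constructor
      · intro _
        exact ⟨String.ofList (c :: rest), by simpa using hmem, by simpa using hexe,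
          by simp⟩
      · intro _; rfl
    · constructor
      · intro hscan
        obtain ⟨a, ha, hexe, hsuf⟩ := ihiff.mp hscan
        exact ⟨a, ha, hexe, hsuf.trans (List.suffix_cons c rest)⟩
      · rintro ⟨a, ha, hexe, hsuf⟩
        rcases List.suffix_cons_iff.mp hsuf with heq | hsuf'
        · exfalso
          apply h
          refine ⟨by rw [heq] at hexe; exact hexe, ?_⟩
          have hca : String.ofList (c :: rest) = a := by
            apply String.toList_inj.mp; simp [heq]
          rw [hca]; simpa using ha
        · exact ihiff.mpr ⟨a, ha, hexe, hsuf'⟩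

-- ===== VERDICT =====
theorem is_allowed_app_spec : Claim_equal_is_allowed_app := by
  intro target allowed _
  unfold Spec_is_allowed_app is_allowed_app is_allowed_app_alt
  by_cases h : allowed.contains (PySem.Str.lower (if target == "" then "" else target)) = true
  · simp only [h, if_true]
  · rw [if_neg h, if_neg h, pv_scan_eq]
    simp [PySem.Str.endswith_eq]
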